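-- pv_equiv track=rewrite | github.com/enzodlz/Paci-nciaAcorde-oDOENZOZ | parte4.py | lista_movimentos_possiveis
-- ===== SOURCE A (Python) =====
-- def extrai_naipe (carta):
--     divide_str = [list(letra) for letra in carta]
--     if len(divide_str) == 3:
--         return divide_str [2] [0]
--     if len(divide_str) == 2:
--         return divide_str [1] [0]
--
-- def extrai_valor (carta):
--     divide_str = [list(letra) for letra in carta]
--     if len(divide_str) == 3:
--         return divide_str [0] [0] + divide_str [1] [0]
--     if len(divide_str) == 2:
--         return divide_str [0] [0]
--
-- def lista_movimentos_possiveis (baralho, posicao):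
--     lugar = []
--     if posicao == 0:
--         return []
--     for cartas in range(len(baralho)):
--         if extrai_naipe(baralho[cartas]) == extrai_naipe (baralho [posicao]) and cartas == posicao - 1:
--             lugar.append (1)
--         if extrai_naipe(baralho[cartas]) == extrai_naipe (baralho [posicao]) and cartas == posicao - 3:
--             lugar.append (3)
--         if extrai_valor(baralho[cartas]) == extrai_valor (baralho [posicao]) and cartas == posicao - 1:
--             lugar.append (1)
--         if extrai_valor(baralho[cartas]) == extrai_valor (baralho [posicao]) and cartas == posicao - 3:
--             lugar.append (3)
--     if lugar == []:
--         return []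
--
--     return sorted(lugar)
-- ===== SOURCE B (Python) =====
-- def _naipe(carta):
--     # last character for 2- or 3-char cards, else None (A's extrai_naipe)
--     return carta[-1] if len(carta) in (2, 3) else None
--
-- def _valor(carta):
--     # everything before the last character, else None (A's extrai_valor)
--     return carta[:-1] if len(carta) in (2, 3) else None
--
-- def lista_movimentos_possiveis(baralho, posicao):
--     if posicao <= 0 or not baralho:
--         return []
--     alvo = baralho[posicao]
--     out = []
--     for d in (1, 3):
--         i = posicao - d
--         if i >= 0:
--             out += [d] * ((_naipe(baralho[i]) == _naipe(alvo)) + (_valor(baralho[i]) == _valor(alvo)))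
--     return out
-- ===== Notes on version B (the rewrite author's own statement) =====
-- stated objective: faster
-- what changed: B inspects only the two candidate indices posicao-1 and posicao-3 and emits the matching moves already in sorted order ([1]s then [3]s), instead of scanning the whole deck comparing every card and sorting the collected list.
import Mathlib
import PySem

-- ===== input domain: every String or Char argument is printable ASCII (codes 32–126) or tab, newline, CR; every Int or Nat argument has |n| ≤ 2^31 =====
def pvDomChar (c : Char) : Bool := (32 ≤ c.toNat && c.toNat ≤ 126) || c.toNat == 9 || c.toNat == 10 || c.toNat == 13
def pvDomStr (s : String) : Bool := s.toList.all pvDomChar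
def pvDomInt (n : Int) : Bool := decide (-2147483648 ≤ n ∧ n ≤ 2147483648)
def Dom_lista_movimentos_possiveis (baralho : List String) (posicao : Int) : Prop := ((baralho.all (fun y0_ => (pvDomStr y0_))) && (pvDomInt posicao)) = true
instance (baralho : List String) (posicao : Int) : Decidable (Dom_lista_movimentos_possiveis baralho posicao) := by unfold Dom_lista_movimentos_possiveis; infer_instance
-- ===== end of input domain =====

-- B replaces A's whole-deck scan + sort by a direct O(1) check of the two candidate
-- indices posicao-1 and posicao-3, emitting the moves already in sorted order (objective: faster).


-- ===== PORT A =====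
-- extrai_naipe: divide_str = [list(letra) for letra in carta] is a list of singleton
-- lists, so divide_str[i][0] is exactly carta's i-th character (in range under the
-- length guard, so pyGet? always returns some there).
def extrai_naipe (carta : String) : Option Char :=
  let divide_str := carta.toList
  if divide_str.length = 3 then PySem.List.pyGet? divide_str 2
  else if divide_str.length = 2 then PySem.List.pyGet? divide_str 1
  else none

-- extrai_valor: Python returns a str (concatenation of one or two 1-char strings) or
-- None; strings are modelled as their char lists.
def extrai_valor (carta : String) : Option (List Char) :=
  let divide_str := carta.toList
  if divide_str.length = 3 then
    match PySem.List.pyGet? divide_str 0, PySem.List.pyGet? divide_str 1 with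
    | some a, some b => some [a, b]
    | _, _ => none
  else if divide_str.length = 2 then
    (PySem.List.pyGet? divide_str 0).map (fun a => [a])
  else none

-- A's loop body: cartas ∈ range(len(baralho)) is always in range, so baralho[cartas]
-- is getD; baralho[posicao] raises IndexError when pyGet? is none (excluded by Pre_;
-- the body then leaves lugar unchanged).
def pvStepA (baralho : List String) (posicao : Int) (lugar : List Int) (cartas : Nat) : List Int :=
  match PySem.List.pyGet? baralho posicao with
  | none => lugar
  | some t =>
    let c := baralho.getD cartas ""
    let lugar := if extrai_naipe c = extrai_naipe t ∧ (cartas : Int) = posicao - 1 then lugar ++ [1] else lugar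
    let lugar := if extrai_naipe c = extrai_naipe t ∧ (cartas : Int) = posicao - 3 then lugar ++ [3] else lugar
    let lugar := if extrai_valor c = extrai_valor t ∧ (cartas : Int) = posicao - 1 then lugar ++ [1] else lugar
    if extrai_valor c = extrai_valor t ∧ (cartas : Int) = posicao - 3 then lugar ++ [3] else lugar

def lista_movimentos_possiveis (baralho : List String) (posicao : Int) : List Int :=
  if posicao = 0 then []
  else
    let lugar := (List.range baralho.length).foldl (pvStepA baralho posicao) []
    if lugar = [] then [] else PySem.List.sorted lugar (fun x => x) false

-- ===== PORT B =====
-- _naipe: carta[-1] for 2- or 3-char cards, else None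
def naipe_alt (carta : String) : Option Char :=
  let cs := carta.toList
  if cs.length = 2 ∨ cs.length = 3 then cs.getLast? else none

-- _valor: carta[:-1] for 2- or 3-char cards, else None
def valor_alt (carta : String) : Option (List Char) :=
  let cs := carta.toList
  if cs.length = 2 ∨ cs.length = 3 then some (PySem.List.slice cs none (some (-1))) else none

-- B's loop body: out += [d] * (bool + bool); i = posicao - d is in range whenever
-- it is nonnegative (under Pre_), so pyGetD is exact.
def pvStepB (baralho : List String) (posicao : Int) (alvo : String) (out : List Int) (d : Int) : List Int :=
  let i := posicao - d
  if 0 ≤ i then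
    let c := PySem.List.pyGetD baralho i ""
    out ++ List.replicate
      ((if naipe_alt c = naipe_alt alvo then 1 else 0) +
       (if valor_alt c = valor_alt alvo then 1 else 0)) d
  else out

def lista_movimentos_possiveis_alt (baralho : List String) (posicao : Int) : List Int :=
  if posicao ≤ 0 ∨ baralho = [] then []
  else
    match PySem.List.pyGet? baralho posicao with
    | none => []   -- Python B raises IndexError here (excluded by Pre_)
    | some alvo => [(1 : Int), 3].foldl (pvStepB baralho posicao alvo) []

-- ===== PRECONDITION & SPEC =====
-- Pre_ excludes exactly the inputs on which A raises IndexError: a nonempty deck with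
-- posicao != 0 outside Python's index range [-len, len).
def Pre_lista_movimentos_possiveis (baralho : List String) (posicao : Int) : Prop :=
  posicao = 0 ∨ baralho = [] ∨ (-(baralho.length : Int) ≤ posicao ∧ posicao < (baralho.length : Int))
instance (baralho : List String) (posicao : Int) : Decidable (Pre_lista_movimentos_possiveis baralho posicao) := by unfold Pre_lista_movimentos_possiveis; infer_instance

def pvWitness_lista_movimentos_possiveis : List String × Int := (["2c", "3c"], 1)

def Spec_lista_movimentos_possiveis (baralho : List String) (posicao : Int) (out : List Int) : Prop := out = lista_movimentos_possiveis_alt baralho posicao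
instance (baralho : List String) (posicao : Int) (out : List Int) : Decidable (Spec_lista_movimentos_possiveis baralho posicao out) := by unfold Spec_lista_movimentos_possiveis; infer_instance

-- ===== CLAIM (what is proved, stated in full; the proofs are below) =====
def Claim_equal_lista_movimentos_possiveis : Prop := ∀ (baralho : List String) (posicao : Int), Dom_lista_movimentos_possiveis baralho posicao → Pre_lista_movimentos_possiveis baralho posicao → Spec_lista_movimentos_possiveis baralho posicao (lista_movimentos_possiveis baralho posicao)

-- ===== LEMMAS AND PROOFS =====

-- B's helpers compute exactly A's helpers.
theorem naipe_bridge (carta : String) : naipe_alt carta = extrai_naipe carta := by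
  unfold naipe_alt extrai_naipe
  match h : carta.toList with
  | [] => simp
  | [a] => simp
  | [a, b] => simp [PySem.List.pyGet?, PySem.List.pyIdx?]
  | [a, b, c] => simp [PySem.List.pyGet?, PySem.List.pyIdx?]
  | a :: b :: c :: d :: t => simp

theorem valor_bridge (carta : String) : valor_alt carta = extrai_valor carta := by
  unfold valor_alt extrai_valor
  match h : carta.toList with
  | [] => simp
  | [a] => simp
  | [a, b] => simp [PySem.List.pyGet?, PySem.List.pyIdx?, PySem.List.slice_to_neg_one]
  | [a, b, c] => simp [PySem.List.pyGet?, PySem.List.pyIdx?, PySem.List.slice_to_neg_one]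
  | a :: b :: c :: d :: t => simp

-- a fold whose step never changes the accumulator is the accumulator
theorem pv_foldl_id {α β : Type} (f : α → β → α) (l : List β) (acc : α)
    (h : ∀ a x, f a x = a) : l.foldl f acc = acc := by
  induction l generalizing acc with
  | nil => rfl
  | cons x xs ih => simp [List.foldl_cons, h, ih]

-- flatMap over range n of a function supported at one point
theorem pv_flatMap_range_one {γ : Type} (e : Nat → List γ) (a n : Nat) (ha : a < n)
    (h : ∀ x, x < n → x ≠ a → e x = []) : (List.range n).flatMap e = e a := by
  induction n with
  | zero => omega
  | succ m ih =>
    rw [List.range_succ, List.flatMap_append]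
    by_cases hm : a = m
    · subst hm
      have : (List.range a).flatMap e = [] := by
        apply List.flatMap_eq_nil_iff.mpr
        intro x hx
        simp at hx
        exact h x (by omega) (by omega)
      simp [this]
    · simp [ih (by omega) (fun x h1 h2 => h x (by omega) h2), h m (by omega) (by omega)]

-- flatMap over range n of a function supported at two points a < b
theorem pv_flatMap_range_two {γ : Type} (e : Nat → List γ) (a b n : Nat) (hab : a < b) (hbn : b < n)
    (h : ∀ x, x < n → x ≠ a → x ≠ b → e x = []) : (List.range n).flatMap e = e a ++ e b := by
  induction n with
  | zero => omega
  | succ m ih =>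
    rw [List.range_succ, List.flatMap_append]
    by_cases hm : b = m
    · subst hm
      rw [pv_flatMap_range_one e a b hab (fun x hx hxa => h x (by omega) hxa (by omega))]
      simp
    · simp [ih (by omega) (fun x h1 h2 h3 => h x (by omega) h2 h3), h m (by omega) (by omega) (by omega)]

-- the per-index contribution of A's loop body (proof-only helper)
def pvE (baralho : List String) (posicao : Int) (t : String) (x : Nat) : List Int :=
  (if extrai_naipe (baralho.getD x "") = extrai_naipe t ∧ (x : Int) = posicao - 1 then [1] else []) ++
  ((if extrai_naipe (baralho.getD x "") = extrai_naipe t ∧ (x : Int) = posicao - 3 then [3] else []) ++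
  ((if extrai_valor (baralho.getD x "") = extrai_valor t ∧ (x : Int) = posicao - 1 then [1] else []) ++
  (if extrai_valor (baralho.getD x "") = extrai_valor t ∧ (x : Int) = posicao - 3 then [3] else [])))

theorem pvStepA_append (baralho : List String) (posicao : Int) (t : String)
    (ht : PySem.List.pyGet? baralho posicao = some t) (acc : List Int) (x : Nat) :
    pvStepA baralho posicao acc x = acc ++ pvE baralho posicao t x := by
  unfold pvStepA pvE
  rw [ht]
  simp only []
  split_ifs <;> simp

theorem pvE_nil (baralho : List String) (posicao : Int) (t : String) (x : Nat)
    (h1 : (x : Int) ≠ posicao - 1) (h3 : (x : Int) ≠ posicao - 3) :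
    pvE baralho posicao t x = [] := by
  simp [pvE, h1, h3]

theorem pvE_at1 (baralho : List String) (posicao : Int) (t : String) (x : Nat)
    (h1 : (x : Int) = posicao - 1) (_h3 : (x : Int) ≠ posicao - 3) :
    pvE baralho posicao t x =
      (if extrai_naipe (baralho.getD x "") = extrai_naipe t then [1] else []) ++
      (if extrai_valor (baralho.getD x "") = extrai_valor t then [1] else []) := by
  simp [pvE, h1]

theorem pvE_at3 (baralho : List String) (posicao : Int) (t : String) (x : Nat)
    (_h1 : (x : Int) ≠ posicao - 1) (h3 : (x : Int) = posicao - 3) :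
    pvE baralho posicao t x =
      (if extrai_naipe (baralho.getD x "") = extrai_naipe t then [3] else []) ++
      (if extrai_valor (baralho.getD x "") = extrai_valor t then [3] else []) := by
  simp [pvE, h3]

theorem pvStepB_pos (baralho : List String) (posicao : Int) (alvo : String) (out : List Int) (d : Int)
    (h : 0 ≤ posicao - d) :
    pvStepB baralho posicao alvo out d =
      out ++ List.replicate
        ((if extrai_naipe (PySem.List.pyGetD baralho (posicao - d) "") = extrai_naipe alvo then 1 else 0) +
         (if extrai_valor (PySem.List.pyGetD baralho (posicao - d) "") = extrai_valor alvo then 1 else 0)) d := by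
  unfold pvStepB
  simp only []
  rw [if_pos h]
  simp only [naipe_bridge, valor_bridge]

theorem pvStepB_neg (baralho : List String) (posicao : Int) (alvo : String) (out : List Int) (d : Int)
    (h : ¬ 0 ≤ posicao - d) : pvStepB baralho posicao alvo out d = out := by
  unfold pvStepB
  simp only []
  rw [if_neg h]

theorem main_spec : ∀ (baralho : List String) (posicao : Int), Pre_lista_movimentos_possiveis baralho posicao → lista_movimentos_possiveis baralho posicao = lista_movimentos_possiveis_alt baralho posicao := by
  intro baralho posicao hpre
  by_cases h0 : posicao = 0
  · simp [lista_movimentos_possiveis, lista_movimentos_possiveis_alt, h0]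
  rcases hpre with h | hnil | ⟨hlo, hhi⟩
  · exact absurd h h0
  · subst hnil
    simp [lista_movimentos_possiveis, lista_movimentos_possiveis_alt, h0]
  by_cases hneg : posicao ≤ 0
  · -- negative posicao (in range): both return []
    have hstep : (List.range baralho.length).foldl (pvStepA baralho posicao) [] = [] := by
      apply pv_foldl_id
      intro a x
      have hx1 : ¬((x : Int) = posicao - 1) := by omega
      have hx3 : ¬((x : Int) = posicao - 3) := by omega
      unfold pvStepA
      cases PySem.List.pyGet? baralho posicao with
      | none => rfl
      | some t => simp [hx1, hx3]
    unfold lista_movimentos_possiveis lista_movimentos_possiveis_alt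
    rw [if_neg h0, if_pos (Or.inl hneg), hstep]
    rfl
  · rw [not_le] at hneg  -- 0 < posicao
    have hq : posicao.toNat < baralho.length := by omega
    have ht : PySem.List.pyGet? baralho posicao = some baralho[posicao.toNat] := by
      apply PySem.List.pyGet?_eq_some_getElem
      · omega
      · have := PySem.List.len_eq (xs := baralho)
        omega
    have hfold : (List.range baralho.length).foldl (pvStepA baralho posicao) [] =
        (List.range baralho.length).flatMap (pvE baralho posicao baralho[posicao.toNat]) := by
      rw [PySem.List.foldl_congr_mem (List.range baralho.length) (pvStepA baralho posicao)
            (fun acc x => acc ++ pvE baralho posicao baralho[posicao.toNat] x) []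
            (fun acc x _ => pvStepA_append baralho posicao _ ht acc x)]
      rw [PySem.List.foldl_append_eq_flatMap, List.nil_append]
    have hBne : ¬(posicao ≤ 0 ∨ baralho = []) := by
      rintro (h | h)
      · omega
      · subst h
        simp at hq
    have e1 : posicao - 1 = ((posicao.toNat - 1 : Nat) : Int) := by omega
    unfold lista_movimentos_possiveis lista_movimentos_possiveis_alt
    rw [if_neg h0, if_neg hBne, ht, hfold]
    simp only [List.foldl_cons, List.foldl_nil]
    by_cases h3 : 3 ≤ posicao
    · have e3 : posicao - 3 = ((posicao.toNat - 3 : Nat) : Int) := by omega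
      rw [pv_flatMap_range_two (pvE baralho posicao baralho[posicao.toNat])
            (posicao.toNat - 3) (posicao.toNat - 1) baralho.length (by omega) (by omega)
            (fun x hx hxa hxb => pvE_nil _ _ _ x (by omega) (by omega))]
      rw [pvE_at3 _ _ _ _ (by omega) (by omega), pvE_at1 _ _ _ _ (by omega) (by omega)]
      rw [pvStepB_pos _ _ _ _ 1 (by omega), pvStepB_pos _ _ _ _ 3 (by omega)]
      rw [e1, e3]
      simp only [PySem.List.pyGetD_natCast]
      split_ifs <;> first | decide | simp_all
    · rw [pv_flatMap_range_one (pvE baralho posicao baralho[posicao.toNat])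
            (posicao.toNat - 1) baralho.length (by omega)
            (fun x hx hxa => pvE_nil _ _ _ x (by omega) (by omega))]
      rw [pvE_at1 _ _ _ _ (by omega) (by omega)]
      rw [pvStepB_neg _ _ _ _ 3 (by omega), pvStepB_pos _ _ _ _ 1 (by omega)]
      rw [e1]
      simp only [PySem.List.pyGetD_natCast]
      split_ifs <;> first | decide | simp_all

-- ===== VERDICT (by name: the statement is the Claim_ definition above) =====
theorem lista_movimentos_possiveis_spec : Claim_equal_lista_movimentos_possiveis := by
  intro baralho posicao _ hpre
  exact main_spec baralho posicao hpre
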